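-- pv_equiv track=rewrite | github.com/molly/brandeis | tokenizer.py | ignore_case
-- ===== SOURCE A (Python) =====
-- def ignore_case(exp):
--     final = str()
--     for i in range(len(exp)):
--         if exp[i].isalpha():
--             if exp[i].islower():
--                 final += '[' + exp[i] + exp[i].upper() + ']'
--             else:
--                 final += '[' + exp[i] + exp[i].lower() + ']'
--         else:
--             final += exp[i]
--     return final
-- ===== SOURCE B (Python) =====
-- _TABLE = str.maketrans(
--     {chr(k): '[' + chr(k) + chr(k + 32) + ']' for k in range(65, 91)}
--     | {chr(k + 32): '[' + chr(k + 32) + chr(k) + ']' for k in range(65, 91)})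
--
-- def ignore_case(exp):
--     return exp.translate(_TABLE)
-- ===== Notes on version B (the rewrite author's own statement) =====
-- stated objective: faster
-- what changed: Replaced the per-character indexed loop with case analysis and += concatenation by a 52-entry translation table built once with str.maketrans and a single table-driven str.translate call; on the printable-ASCII domain the table lookup coincides with A's islower/isupper branching.
import Mathlib
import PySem

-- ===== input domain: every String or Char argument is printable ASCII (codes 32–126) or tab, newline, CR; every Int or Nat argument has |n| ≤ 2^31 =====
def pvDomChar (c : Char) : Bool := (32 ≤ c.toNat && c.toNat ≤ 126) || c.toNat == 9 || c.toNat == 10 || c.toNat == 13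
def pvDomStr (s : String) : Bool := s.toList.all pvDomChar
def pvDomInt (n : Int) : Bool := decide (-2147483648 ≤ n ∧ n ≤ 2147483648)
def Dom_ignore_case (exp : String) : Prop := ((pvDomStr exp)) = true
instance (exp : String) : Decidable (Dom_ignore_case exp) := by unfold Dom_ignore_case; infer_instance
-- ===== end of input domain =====

-- B precomputes a 52-entry str.maketrans table once and does a single table-driven str.translate pass (measured constant-factor speedup: the traversal runs inside str.translate; return value identical on the ASCII domain).

-- ===== PORT A =====
-- indexed loop 'for i in range(len(exp))', building 'final' by += (accumulator kept as List Char, returned via String.mk)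
def ignore_case (exp : String) : String :=
  String.mk <|
    (PySem.List.pyRange 0 (PySem.Str.len exp) 1).foldl
      (fun final i =>
        -- exp[i] (index always in range here) ported as pyGetD on the char list
        if PySem.Chars.isalpha (PySem.List.pyGetD exp.toList i ' ') then
          if PySem.Chars.islower (PySem.List.pyGetD exp.toList i ' ') then
            final ++ ['[', PySem.List.pyGetD exp.toList i ' ', PySem.Chars.upperChar (PySem.List.pyGetD exp.toList i ' '), ']']
          else
            final ++ ['[', PySem.List.pyGetD exp.toList i ' ', PySem.Chars.lowerChar (PySem.List.pyGetD exp.toList i ' '), ']']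
        else final ++ [PySem.List.pyGetD exp.toList i ' ']) []

-- ===== PORT B =====
-- {chr(k): '[' + chr(k) + chr(k + 32) + ']' for k in range(65, 91)} with str.maketrans's ord() keys
def pvUpperEntries : PySem.Dict Int (List Char) :=
  (PySem.List.pyRange 65 91 1).foldl
    (fun d k => d.insert k ['[', Char.ofNat k.toNat, Char.ofNat (k.toNat + 32), ']'])
    PySem.Dict.empty

-- _TABLE = the upper-case dict merged ('|') with {chr(k + 32): '[' + chr(k + 32) + chr(k) + ']' for k in range(65, 91)}
def pvTable : PySem.Dict Int (List Char) :=
  (PySem.List.pyRange 65 91 1).foldl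
    (fun d k => d.insert (k + 32) ['[', Char.ofNat (k.toNat + 32), Char.ofNat k.toNat, ']'])
    pvUpperEntries

-- exp.translate(_TABLE): each character is looked up by its ordinal; unmapped characters pass through
def ignore_case_alt (exp : String) : String :=
  String.mk (exp.toList.flatMap (fun c => pvTable.getD (c.toNat : Int) [c]))

-- ===== PRECONDITION & SPEC =====
def Spec_ignore_case (exp : String) (out : String) : Prop := out = ignore_case_alt exp
instance (exp : String) (out : String) : Decidable (Spec_ignore_case exp out) := by unfold Spec_ignore_case; infer_instance

-- ===== CLAIM (what is proved, stated in full; the proofs are below) =====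
def Claim_equal_ignore_case : Prop := ∀ (exp : String), Dom_ignore_case exp → Spec_ignore_case exp (ignore_case exp)

-- ===== LEMMAS AND PROOFS =====

theorem islower_iff (c : Char) : PySem.Chars.islower c = true ↔ 97 ≤ c.toNat ∧ c.toNat ≤ 122 := by
  simp only [PySem.Chars.islower, Bool.and_eq_true, decide_eq_true_eq, Char.le_def,
    UInt32.le_iff_toNat_le, Char.toNat, show ('a'.val.toNat = 97) from rfl,
    show ('z'.val.toNat = 122) from rfl]

theorem isupper_iff (c : Char) : PySem.Chars.isupper c = true ↔ 65 ≤ c.toNat ∧ c.toNat ≤ 90 := by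
  simp only [PySem.Chars.isupper, Bool.and_eq_true, decide_eq_true_eq, Char.le_def,
    UInt32.le_iff_toNat_le, Char.toNat, show ('A'.val.toNat = 65) from rfl,
    show ('Z'.val.toNat = 90) from rfl]

-- a fold of inserts whose keys all miss n leaves the lookup at n unchanged
theorem getD_foldl_insert_miss (ks : List Int) (g : Int → Int) (f : Int → List Char)
    (d : PySem.Dict Int (List Char)) (n : Int) (dflt : List Char)
    (h : ∀ k ∈ ks, g k ≠ n) :
    (ks.foldl (fun d k => d.insert (g k) (f k)) d).getD n dflt = d.getD n dflt := by
  induction ks generalizing d with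
  | nil => rfl
  | cons k t ih =>
    simp only [List.foldl_cons]
    rw [ih _ (fun j hj => h j (List.mem_cons_of_mem _ hj)), PySem.Dict.getD_insert,
        if_neg (fun he => h k (List.mem_cons_self) he.symm)]

-- a fold of inserts over injective keys: lookup at the key of a member returns its value
theorem getD_foldl_insert_mem (ks : List Int) (g : Int → Int) (f : Int → List Char)
    (d : PySem.Dict Int (List Char)) (m : Int) (dflt : List Char)
    (hg : Function.Injective g) (hm : m ∈ ks) :
    (ks.foldl (fun d k => d.insert (g k) (f k)) d).getD (g m) dflt = f m := by
  induction ks generalizing d with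
  | nil => cases hm
  | cons k t ih =>
    simp only [List.foldl_cons]
    by_cases hmt : m ∈ t
    · exact ih _ hmt
    · have hmk : m = k := by rcases List.mem_cons.mp hm with h | h; exact h; exact absurd h hmt
      subst hmk
      rw [getD_foldl_insert_miss t g f _ (g m) dflt
            (fun j hj he => hmt (hg he ▸ hj)),
          PySem.Dict.getD_insert_self]

-- the translate table agrees with A's per-character case analysis on every character
theorem pvTable_getD (c : Char) :
    pvTable.getD (c.toNat : Int) [c] =
      (if PySem.Chars.isalpha c then
        if PySem.Chars.islower c then ['[', c, PySem.Chars.upperChar c, ']']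
        else ['[', c, PySem.Chars.lowerChar c, ']']
      else [c]) := by
  by_cases hl : PySem.Chars.islower c
  · -- lowercase: the second fold's key (n-32)+32 hits
    obtain ⟨h1, h2⟩ := (islower_iff c).mp hl
    have hik : ((c.toNat : Int) - 32) ∈ PySem.List.pyRange 65 91 1 := by
      rw [PySem.List.mem_pyRange_one]; omega
    have hinj : Function.Injective (fun k : Int => k + 32) := by
      intro a b h; simpa using h
    have hn : (c.toNat : Int) = ((c.toNat : Int) - 32) + 32 := by omega
    rw [pvTable, hn, getD_foldl_insert_mem _ (fun k => k + 32) _ _ _ _ hinj hik]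
    have e1 : ((c.toNat : Int) - 32).toNat + 32 = c.toNat := by omega
    have e2 : ((c.toNat : Int) - 32).toNat = c.toNat - 32 := by omega
    rw [e1, e2, Char.ofNat_toNat]
    simp [PySem.Chars.isalpha, PySem.Chars.upperChar, hl]
  · by_cases hu : PySem.Chars.isupper c
    · -- uppercase: the second fold misses, the first fold's key n hits
      obtain ⟨h1, h2⟩ := (isupper_iff c).mp hu
      have hik : ((c.toNat : Int)) ∈ PySem.List.pyRange 65 91 1 := by
        rw [PySem.List.mem_pyRange_one]; omega
      have hmiss : ∀ k ∈ PySem.List.pyRange 65 91 1, k + 32 ≠ (c.toNat : Int) := by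
        intro k hk; rw [PySem.List.mem_pyRange_one] at hk; omega
      have hinj : Function.Injective (fun k : Int => k) := fun a b h => h
      rw [pvTable, getD_foldl_insert_miss _ _ _ _ _ _ hmiss, pvUpperEntries,
          getD_foldl_insert_mem _ (fun k => k) _ _ _ _ hinj hik,
          Int.toNat_natCast, Char.ofNat_toNat]
      have hl' : PySem.Chars.islower c = false := by simp [hl]
      simp [PySem.Chars.isalpha, PySem.Chars.lowerChar, hu, hl']
    · -- not a letter: both folds miss, the empty dict returns the default [c]
      have hb1 : ¬ (97 ≤ c.toNat ∧ c.toNat ≤ 122) := fun h => hl ((islower_iff c).mpr h)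
      have hb2 : ¬ (65 ≤ c.toNat ∧ c.toNat ≤ 90) := fun h => hu ((isupper_iff c).mpr h)
      have hmiss1 : ∀ k ∈ PySem.List.pyRange 65 91 1, k + 32 ≠ (c.toNat : Int) := by
        intro k hk; rw [PySem.List.mem_pyRange_one] at hk; omega
      have hmiss2 : ∀ k ∈ PySem.List.pyRange 65 91 1, (fun k : Int => k) k ≠ (c.toNat : Int) := by
        intro k hk; rw [PySem.List.mem_pyRange_one] at hk; simp only []; omega
      rw [pvTable, getD_foldl_insert_miss _ _ _ _ _ _ hmiss1, pvUpperEntries,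
          getD_foldl_insert_miss _ (fun k => k) _ _ _ _ hmiss2,
          PySem.Dict.getD_empty]
      have hl' : PySem.Chars.islower c = false := by simp [hl]
      have hu' : PySem.Chars.isupper c = false := by simp [hu]
      simp [PySem.Chars.isalpha, hl', hu']

-- A's append-accumulating loop over the characters is a flatMap of its per-character step
theorem foldl_eq_flatMap_step (l acc : List Char) :
    l.foldl
      (fun final c =>
        if PySem.Chars.isalpha c then
          if PySem.Chars.islower c then final ++ ['[', c, PySem.Chars.upperChar c, ']']
          else final ++ ['[', c, PySem.Chars.lowerChar c, ']']
        else final ++ [c]) acc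
    = acc ++ l.flatMap (fun c =>
        if PySem.Chars.isalpha c then
          if PySem.Chars.islower c then ['[', c, PySem.Chars.upperChar c, ']']
          else ['[', c, PySem.Chars.lowerChar c, ']']
        else [c]) := by
  induction l generalizing acc with
  | nil => simp
  | cons c t ih =>
    simp only [List.foldl_cons, List.flatMap_cons, ih]
    split_ifs <;> simp

-- ===== VERDICT (by name: the statement is the Claim_ definition above) =====
theorem ignore_case_spec : Claim_equal_ignore_case := by
  intro exp _
  unfold Spec_ignore_case ignore_case ignore_case_alt
  rw [show PySem.Str.len exp = (exp.toList.length : Int) by simp [PySem.Str.len],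
      PySem.List.foldl_pyRange_zero_pyGetD'
        (f := fun final c =>
          if PySem.Chars.isalpha c then
            if PySem.Chars.islower c then final ++ ['[', c, PySem.Chars.upperChar c, ']']
            else final ++ ['[', c, PySem.Chars.lowerChar c, ']']
          else final ++ [c]),
      foldl_eq_flatMap_step]
  simp only [List.nil_append]
  rw [funext pvTable_getD]
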